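-- pv_equiv track=rewrite | github.com/goaziz/leetcode | Easy/find_target_indeces_after_sort_2089.py | targetIndices2
-- ===== SOURCE A (Python) =====
-- from typing import List
--
-- def targetIndices2(nums: List[int], target: int) -> List[int]:
--     less_than_or_equal = 0
--     less_than = 0
--
--     for num in nums:
--         if num <= target:
--             less_than_or_equal += 1
--
--         if num < target:
--             less_than += 1
--
--     return list(range(less_than, less_than_or_equal))
-- ===== SOURCE B (Python) =====
-- def targetIndices2(nums, target):
--     return [i for i, v in enumerate(sorted(nums)) if v == target]
-- ===== Notes on version B (the rewrite author's own statement) =====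
-- stated objective: idiomatic
-- what changed: B sorts a copy of the list and collects the indices where the sorted value equals target, instead of A's two comparison counters feeding a range().
import Mathlib
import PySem

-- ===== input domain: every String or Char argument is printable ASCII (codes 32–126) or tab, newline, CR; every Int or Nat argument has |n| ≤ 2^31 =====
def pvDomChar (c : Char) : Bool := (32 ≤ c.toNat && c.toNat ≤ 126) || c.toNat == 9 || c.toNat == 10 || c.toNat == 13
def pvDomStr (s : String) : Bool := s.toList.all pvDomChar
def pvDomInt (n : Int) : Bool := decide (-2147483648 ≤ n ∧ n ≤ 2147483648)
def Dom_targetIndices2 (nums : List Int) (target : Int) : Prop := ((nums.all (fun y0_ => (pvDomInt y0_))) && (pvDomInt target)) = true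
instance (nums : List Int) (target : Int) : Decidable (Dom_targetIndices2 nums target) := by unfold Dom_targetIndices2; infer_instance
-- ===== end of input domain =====

-- B sorts a copy and collects indices whose sorted value equals target (idiomatic), instead of A's two comparison counters feeding range().


-- ===== PORT A =====
def targetIndices2 (nums : List Int) (target : Int) : List Int :=
  let st := nums.foldl
    (fun (acc : Int × Int) num =>
      let acc := if num ≤ target then (acc.1 + 1, acc.2) else acc
      if num < target then (acc.1, acc.2 + 1) else acc)
    (0, 0)
  PySem.List.pyRange st.2 st.1 1

-- ===== PORT B =====
def targetIndices2_alt (nums : List Int) (target : Int) : List Int :=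
  ((PySem.List.enumerate (PySem.List.sorted nums (fun x => x) false) 0).filter
      (fun p => p.2 == target)).map (fun p => p.1)

-- ===== PRECONDITION & SPEC =====
def Spec_targetIndices2 (nums : List Int) (target : Int) (out : List Int) : Prop := out = targetIndices2_alt nums target
instance (nums : List Int) (target : Int) (out : List Int) : Decidable (Spec_targetIndices2 nums target out) := by unfold Spec_targetIndices2; infer_instance

-- ===== CLAIM (what is proved, stated in full; the proofs are below) =====
def Claim_equal_targetIndices2 : Prop := ∀ (nums : List Int) (target : Int), Dom_targetIndices2 nums target → Spec_targetIndices2 nums target (targetIndices2 nums target)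

-- ===== LEMMAS AND PROOFS =====

-- A's fold computes the two comparison counts.
theorem targetIndices2_fold_counts (nums : List Int) (target : Int) (le lt : Int) :
    nums.foldl
      (fun (acc : Int × Int) num =>
        let acc := if num ≤ target then (acc.1 + 1, acc.2) else acc
        if num < target then (acc.1, acc.2 + 1) else acc)
      (le, lt)
    = (le + (nums.countP (fun x => x ≤ target) : Int),
       lt + (nums.countP (fun x => x < target) : Int)) := by
  induction nums generalizing le lt with
  | nil => simp
  | cons h t ih =>
    simp only [List.foldl_cons, List.countP_cons]
    by_cases h1 : h ≤ target <;> by_cases h2 : h < target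
    · simp only [if_pos h1, if_pos h2, ih, Prod.ext_iff]
      refine ⟨?_, ?_⟩ <;> (simp [h1, h2]; try omega)
    · simp only [if_pos h1, if_neg h2, ih, Prod.ext_iff]
      refine ⟨?_, ?_⟩ <;> (simp [h1, h2]; try omega)
    · omega
    · simp only [if_neg h1, if_neg h2, ih, Prod.ext_iff]
      refine ⟨?_, ?_⟩ <;> simp [h1, h2]

-- In a list sorted ascending, the indices whose value equals target form the
-- contiguous range [count(< target), count(≤ target)).
theorem filter_enumerate_sorted (target : Int) (s : List Int)
    (hs : s.Pairwise (fun a b => a ≤ b)) (a : Int) :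
    ((PySem.List.enumerate s a).filter (fun p => p.2 == target)).map (fun p => p.1)
    = PySem.List.pyRange (a + (s.countP (fun x => x < target) : Int))
        (a + (s.countP (fun x => x ≤ target) : Int)) 1 := by
  induction s generalizing a with
  | nil =>
    simp [PySem.List.enumerate_nil, PySem.List.pyRange_one_eq_nil]
  | cons h t ih =>
    have hpw := List.pairwise_cons.mp hs
    have hle : ∀ x ∈ t, h ≤ x := hpw.1
    have ih' := ih hpw.2
    rw [PySem.List.enumerate_cons]
    rcases lt_trichotomy h target with hlt | heq | hgt
    · -- h < target : head dropped, both counts on the tail shift by 1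
      have hne : (h == target) = false := beq_eq_false_iff_ne.mpr (ne_of_lt hlt)
      have hhl : decide (h < target) = true := by simp [hlt]
      have hhle : decide (h ≤ target) = true := decide_eq_true (le_of_lt hlt)
      simp only [List.filter_cons, hne, List.countP_cons, hhl, hhle,
        Bool.false_eq_true, if_false, if_true]
      rw [ih' (a + 1)]
      congr 1 <;> push_cast <;> ring
    · -- h = target : no element is < target; head kept at index a
      subst heq
      have hlt0 : t.countP (fun x => x < h) = 0 := by
        rw [List.countP_eq_zero]
        intro x hx
        simp
        exact hle x hx
      have hkeep : (h == h) = true := by simp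
      have hhl : decide (h < h) = false := by simp
      have hhle : decide (h ≤ h) = true := by simp
      simp only [List.filter_cons, hkeep, List.countP_cons, hlt0, hhl, hhle,
        Bool.false_eq_true, if_false, if_true, List.map_cons]
      rw [ih' (a + 1), hlt0]
      push_cast
      have hc : (0:Int) ≤ (t.countP (fun x => decide (x ≤ h)) : Int) := Int.natCast_nonneg _
      rw [PySem.List.pyRange_one_cons (a := a + 0)
        (b := a + ((t.countP (fun x => decide (x ≤ h)) : Int) + 1)) (by omega)]
      congr 1
      · ring
      · congr 1 <;> ring
    · -- target < h : nothing equals target in h :: t, both counts are 0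
      have hall : ∀ x ∈ t, target < x := fun x hx => lt_of_lt_of_le hgt (hle x hx)
      have hle0 : t.countP (fun x => x ≤ target) = 0 := by
        rw [List.countP_eq_zero]; intro x hx; simp; exact hall x hx
      have hlt0 : t.countP (fun x => x < target) = 0 := by
        rw [List.countP_eq_zero]; intro x hx; simp; exact le_of_lt (hall x hx)
      have hne : (h == target) = false := by simp; omega
      have hhl : decide (h < target) = false := by simp; omega
      have hhle : decide (h ≤ target) = false := by simp; omega
      simp only [List.filter_cons, hne, List.countP_cons, hhl, hhle,
        hle0, hlt0, Bool.false_eq_true, if_false]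
      rw [ih' (a + 1), hle0, hlt0]
      simp [PySem.List.pyRange_one_eq_nil]

-- ===== VERDICT (by name: the statement is the Claim_ definition above) =====
theorem targetIndices2_spec : Claim_equal_targetIndices2 := by
  intro nums target _
  unfold Spec_targetIndices2 targetIndices2 targetIndices2_alt
  rw [targetIndices2_fold_counts]
  have hperm : (PySem.List.sorted nums (fun x => x) false).Perm nums :=
    PySem.List.sorted_perm nums (fun x => x) false
  have hpw : (PySem.List.sorted nums (fun x => x) false).Pairwise (fun a b => a ≤ b) := by
    have := PySem.List.sorted_pairwise nums (fun x => x)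
    simpa using this
  rw [filter_enumerate_sorted target _ hpw 0,
    hperm.countP_eq, hperm.countP_eq]
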